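-- pv_equiv track=rewrite | github.com/mbingenheimer/sutra2DNA | website_folder/testing/main.py | convert_dna_to_encoded
-- ===== SOURCE A (Python) =====
-- transcoding = ['A', 'C', 'G', 'T']
--
-- def convert_dna_to_encoded(dna_string):
--     encoded_string = ''
--     binary_stage = ''
--     for character in dna_string:
--         binary_stage += str(int(transcoding.index(character) / 2))
--         binary_stage += str(int(transcoding.index(character) % 2))
--     for i in range(0, len(binary_stage), 8):
--         encoded_string += chr(int(binary_stage[i:i + 8], 2))
--     return encoded_string
-- ===== SOURCE B (Python) =====
-- transcoding = ['A', 'C', 'G', 'T']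
--
--
-- def convert_dna_to_encoded(dna_string):
--     encoded = []
--     for i in range(0, len(dna_string), 4):
--         value = 0
--         for character in dna_string[i:i + 4]:
--             value = value * 4 + transcoding.index(character)
--         encoded.append(chr(value))
--     return ''.join(encoded)
-- ===== Notes on version B (the rewrite author's own statement) =====
-- stated objective: simpler
-- what changed: B drops A's intermediate binary string entirely: it walks the input in groups of 4 characters and folds each group arithmetically (value = value*4 + index) into one output character, instead of building a binary-digit string and re-parsing it in 8-bit slices.
import Mathlib
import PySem

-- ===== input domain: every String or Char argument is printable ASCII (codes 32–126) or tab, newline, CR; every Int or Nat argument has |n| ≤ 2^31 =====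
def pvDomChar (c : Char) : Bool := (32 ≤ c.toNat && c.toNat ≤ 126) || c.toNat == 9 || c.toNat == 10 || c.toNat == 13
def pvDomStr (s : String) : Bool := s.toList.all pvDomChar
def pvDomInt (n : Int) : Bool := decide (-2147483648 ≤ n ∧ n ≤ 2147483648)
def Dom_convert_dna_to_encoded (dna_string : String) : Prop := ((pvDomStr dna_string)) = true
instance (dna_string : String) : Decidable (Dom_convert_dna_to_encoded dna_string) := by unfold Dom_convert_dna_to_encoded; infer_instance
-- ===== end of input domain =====

-- B replaces A's build-a-binary-string-then-rechunk pipeline by one grouped arithmetic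
-- pass over 4-character groups (simpler decomposition; same asymptotic cost).


-- ===== PORT A =====
def transcoding : List Char := ['A', 'C', 'G', 'T']

-- transcoding.index(character); the ValueError case (character ∉ transcoding) is excluded
-- by Pre_, so the default 0 is never reached on admitted inputs
def pyIndexD (c : Char) : Nat := (PySem.List.index? transcoding c).getD 0

-- int(s, 2): exact on strings of binary digit characters, the only ones occurring here
def parseBin (cs : List Char) : Nat :=
  cs.foldl (fun a c => 2 * a + (if c = '1' then 1 else 0)) 0

-- int(idx / 2) equals idx // 2 here since idx ∈ {0,1,2,3} is nonnegative;
-- chr(v) is Char.ofNat v, exact since every chunk value is < 256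
def convert_dna_to_encoded (dna_string : String) : String :=
  let binary_stage : List Char := dna_string.toList.foldl
    (fun bs c =>
      bs ++ (PySem.Int.toStr (PySem.Int.floordiv (pyIndexD c) 2)).toList
         ++ (PySem.Int.toStr (PySem.Int.mod (pyIndexD c) 2)).toList) []
  let encoded : List Char := (PySem.List.pyRange 0 (binary_stage.length : Int) 8).foldl
    (fun es i => es ++ [Char.ofNat (parseBin (PySem.List.slice binary_stage (some i) (some (i + 8))))]) []
  String.ofList encoded

-- ===== PORT B =====
def groupValue (g : List Char) : Nat :=
  g.foldl (fun v c => v * 4 + pyIndexD c) 0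

def convert_dna_to_encoded_alt (dna_string : String) : String :=
  let cs : List Char := dna_string.toList
  String.ofList ((PySem.List.pyRange 0 (cs.length : Int) 4).foldl
    (fun es i => es ++ [Char.ofNat (groupValue (PySem.List.slice cs (some i) (some (i + 4))))]) [])

-- ===== PRECONDITION & SPEC =====
-- Pre_ excludes exactly the inputs on which Python A raises ValueError
-- (a character other than 'A','C','G','T' reaching transcoding.index)
def Pre_convert_dna_to_encoded (dna_string : String) : Prop :=
  dna_string.toList.all (fun c => transcoding.contains c) = true
instance (dna_string : String) : Decidable (Pre_convert_dna_to_encoded dna_string) := by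
  unfold Pre_convert_dna_to_encoded; infer_instance
def pvWitness_convert_dna_to_encoded : String := "ACGT"
def Spec_convert_dna_to_encoded (dna_string : String) (out : String) : Prop := out = convert_dna_to_encoded_alt dna_string
instance (dna_string : String) (out : String) : Decidable (Spec_convert_dna_to_encoded dna_string out) := by unfold Spec_convert_dna_to_encoded; infer_instance

-- ===== CLAIM (what is proved, stated in full; the proofs are below) =====
def Claim_equal_convert_dna_to_encoded : Prop := ∀ (dna_string : String), Dom_convert_dna_to_encoded dna_string → Pre_convert_dna_to_encoded dna_string → Spec_convert_dna_to_encoded dna_string (convert_dna_to_encoded dna_string)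

-- ===== LEMMAS AND PROOFS =====

-- the two binary digits A emits for one character
def bits (c : Char) : List Char :=
  (PySem.Int.toStr (PySem.Int.floordiv (pyIndexD c) 2)).toList
    ++ (PySem.Int.toStr (PySem.Int.mod (pyIndexD c) 2)).toList

theorem pyIndexD_lt_four (c : Char) : pyIndexD c < 4 := by
  unfold pyIndexD
  cases h : PySem.List.index? transcoding c with
  | none => simp
  | some k =>
    obtain ⟨hk, -, -⟩ := PySem.List.getElem_of_index?_eq_some h
    simpa [transcoding] using hk

theorem length_bits (c : Char) : (bits c).length = 2 := by
  have h := pyIndexD_lt_four c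
  unfold bits
  interval_cases h : pyIndexD c <;> decide

theorem foldl_bits (c : Char) (a : Nat) :
    (bits c).foldl (fun a c => 2 * a + (if c = '1' then 1 else 0)) a = 4 * a + pyIndexD c := by
  have h := pyIndexD_lt_four c
  unfold bits
  unfold pyIndexD at *
  interval_cases h : (PySem.List.index? transcoding c).getD 0 <;>
    first
    | (rw [show (PySem.Int.toStr (PySem.Int.floordiv ((0:Nat):Int) 2)).toList
            ++ (PySem.Int.toStr (PySem.Int.mod ((0:Nat):Int) 2)).toList = ['0','0'] from by decide]
       simp [List.foldl]; omega)
    | (rw [show (PySem.Int.toStr (PySem.Int.floordiv ((1:Nat):Int) 2)).toList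
            ++ (PySem.Int.toStr (PySem.Int.mod ((1:Nat):Int) 2)).toList = ['0','1'] from by decide]
       simp [List.foldl]; omega)
    | (rw [show (PySem.Int.toStr (PySem.Int.floordiv ((2:Nat):Int) 2)).toList
            ++ (PySem.Int.toStr (PySem.Int.mod ((2:Nat):Int) 2)).toList = ['1','0'] from by decide]
       simp [List.foldl]; omega)
    | (rw [show (PySem.Int.toStr (PySem.Int.floordiv ((3:Nat):Int) 2)).toList
            ++ (PySem.Int.toStr (PySem.Int.mod ((3:Nat):Int) 2)).toList = ['1','1'] from by decide]
       simp [List.foldl]; omega)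

theorem foldl_flatMap_bits (g : List Char) (a : Nat) :
    (g.flatMap bits).foldl (fun a c => 2 * a + (if c = '1' then 1 else 0)) a
      = g.foldl (fun v c => v * 4 + pyIndexD c) a := by
  induction g generalizing a with
  | nil => rfl
  | cons c g ih =>
    simp only [List.flatMap_cons, List.foldl_append, List.foldl_cons]
    rw [foldl_bits, ih, Nat.mul_comm]

theorem length_flatMap_bits (g : List Char) : (g.flatMap bits).length = 2 * g.length := by
  induction g with
  | nil => rfl
  | cons c g ih => simp [List.flatMap_cons, length_bits, ih]; omega

-- proof-side chunking: split xs into consecutive pieces of length s+1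
def chunks {α : Type} (s : Nat) (xs : List α) : List (List α) :=
  if h : xs = [] then [] else xs.take (s + 1) :: chunks s (xs.drop (s + 1))
termination_by xs.length
decreasing_by
  simp only [List.length_drop]
  have : 0 < xs.length := List.length_pos_iff.mpr h
  omega

theorem chunks_nil {α : Type} (s : Nat) : chunks s ([] : List α) = [] := by
  simp [chunks]

theorem chunks_cons {α : Type} (s : Nat) (xs : List α) (h : xs ≠ []) :
    chunks s xs = xs.take (s + 1) :: chunks s (xs.drop (s + 1)) := by
  rw [chunks, dif_neg h]

theorem range_map_eq_chunks {α : Type} (s : Nat) (xs : List α) :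
    (List.range ((xs.length + s) / (s + 1))).map (fun k => (xs.drop ((s + 1) * k)).take (s + 1))
      = chunks s xs := by
  rcases eq_or_ne xs [] with h | h
  · subst h
    simp [chunks, Nat.div_eq_of_lt (by omega : s < s + 1)]
  · have hn : 0 < xs.length := List.length_pos_iff.mpr h
    have hm : (xs.length + s) / (s + 1) = (xs.length - 1) / (s + 1) + 1 := by
      have : xs.length + s = (xs.length - 1) + (s + 1) := by omega
      rw [this, Nat.add_div_right _ (by omega)]
    have hq : (xs.length - 1) / (s + 1) = ((xs.drop (s + 1)).length + s) / (s + 1) := by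
      simp only [List.length_drop]
      rcases Nat.lt_or_ge xs.length (s + 1) with hlt | hge
      · rw [Nat.div_eq_of_lt (by omega), Nat.div_eq_of_lt (by omega)]
      · congr 1; omega
    rw [chunks_cons s xs h, hm, List.range_succ_eq_map, List.map_cons, List.map_map]
    refine congrArg₂ List.cons (by simp) ?_
    rw [hq, ← range_map_eq_chunks s (xs.drop (s + 1))]
    apply List.map_congr_left
    intro k _
    simp only [Function.comp_apply, List.drop_drop]
    congr 2
    rw [Nat.mul_succ]
    exact Nat.add_comm _ _
termination_by xs.length
decreasing_by
  simp only [List.length_drop]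
  omega

-- the pyRange-with-slices loop both ports use computes f over the chunks
theorem foldl_pyRange_slice_eq_chunks {α β : Type} (s : Nat) (f : List α → β)
    (xs : List α) (init : List β) :
    (PySem.List.pyRange 0 (xs.length : Int) ((s : Int) + 1)).foldl
        (fun es i => es ++ [f (PySem.List.slice xs (some i) (some (i + ((s : Int) + 1))))]) init
      = init ++ (chunks s xs).map f := by
  rw [PySem.List.foldl_append_singleton_eq_map, PySem.List.pyRange_of_pos _ _ (by positivity)]
  congr 1
  rw [List.map_map]
  have harg : (if (0 : Int) < (xs.length : Int)
        then (((xs.length : Int) - 0 + ((s : Int) + 1) - 1) / ((s : Int) + 1)).toNat else 0)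
      = (xs.length + s) / (s + 1) := by
    rcases eq_or_ne xs [] with h | h
    · subst h
      simp [Nat.div_eq_of_lt (by omega : s < s + 1)]
    · have hn : 0 < xs.length := List.length_pos_iff.mpr h
      rw [if_pos (by exact_mod_cast hn)]
      have : ((xs.length : Int) - 0 + ((s : Int) + 1) - 1) = ((xs.length + s : Nat) : Int) := by
        push_cast; ring
      rw [this, show ((s : Int) + 1) = ((s + 1 : Nat) : Int) by push_cast; ring,
        ← Int.natCast_div, Int.toNat_natCast]
  rw [harg, ← range_map_eq_chunks s xs, List.map_map]
  apply List.map_congr_left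
  intro k _
  simp only [Function.comp_apply]
  congr 1
  have h1 : (0 : Int) + ((s : Int) + 1) * (k : Int) = (((s + 1) * k : Nat) : Int) := by
    push_cast; ring
  have h2 : (0 : Int) + ((s : Int) + 1) * (k : Int) + ((s : Int) + 1)
      = (((s + 1) * k : Nat) : Int) + ((s + 1 : Nat) : Int) := by push_cast; ring
  rw [h1, show ((s : Int) + 1) = ((s + 1 : Nat) : Int) from by push_cast; ring,
    PySem.List.slice_natCast_add]

theorem chunks_bits_eq (cs : List Char) :
    (chunks 7 (cs.flatMap bits)).map (fun bl => Char.ofNat (parseBin bl))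
      = (chunks 3 cs).map (fun g => Char.ofNat (groupValue g)) := by
  rcases eq_or_ne cs [] with h | h
  · subst h
    simp [chunks_nil]
  · have hn : 0 < cs.length := List.length_pos_iff.mpr h
    have hsplit : cs.flatMap bits = (cs.take 4).flatMap bits ++ (cs.drop 4).flatMap bits := by
      rw [← List.flatMap_append, List.take_append_drop]
    rcases Nat.lt_or_ge cs.length 4 with hlt | hge
    · -- short trailing group: a single chunk on both sides
      have hdrop : cs.drop 4 = [] := List.drop_eq_nil_of_le (by omega)
      have hbl : (cs.flatMap bits).length = 2 * cs.length := length_flatMap_bits cs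
      have hne : cs.flatMap bits ≠ [] := by
        intro hc
        rw [hc] at hbl
        simp only [List.length_nil] at hbl
        omega
      rw [chunks_cons 7 _ hne, chunks_cons 3 _ h,
        List.drop_eq_nil_of_le (as := cs.flatMap bits) (by omega), hdrop, chunks_nil, chunks_nil,
        List.take_of_length_le (by omega), List.take_of_length_le (by omega)]
      simp only [List.map_cons, List.map_nil, List.cons.injEq, and_true]
      exact congrArg Char.ofNat (foldl_flatMap_bits cs 0)
    · -- full leading group of 4 characters = one 8-bit chunk
      have htake4 : (cs.take 4).length = 4 := by rw [List.length_take]; omega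
      have hu8 : ((cs.take 4).flatMap bits).length = 8 := by
        rw [length_flatMap_bits, htake4]
      have hne : (cs.take 4).flatMap bits ++ (cs.drop 4).flatMap bits ≠ [] := by
        intro hc
        have := congrArg List.length hc
        simp [hu8] at this
      rw [hsplit, chunks_cons 7 _ hne, chunks_cons 3 _ h,
        List.take_append_of_le_length (by omega), List.take_of_length_le (by omega),
        List.drop_append_of_le_length (by omega), List.drop_eq_nil_of_le (by omega),
        List.nil_append]
      simp only [List.map_cons, List.cons.injEq]
      exact ⟨congrArg Char.ofNat (foldl_flatMap_bits (cs.take 4) 0), chunks_bits_eq (cs.drop 4)⟩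
termination_by cs.length
decreasing_by
  simp only [List.length_drop]
  omega

-- ===== VERDICT (by name: the statement is the Claim_ definition above) =====
theorem convert_dna_to_encoded_spec : Claim_equal_convert_dna_to_encoded := by
  intro dna _ _
  unfold Spec_convert_dna_to_encoded convert_dna_to_encoded convert_dna_to_encoded_alt
  simp only []
  rw [show (fun (bs : List Char) (c : Char) =>
        bs ++ (PySem.Int.toStr (PySem.Int.floordiv (pyIndexD c) 2)).toList
           ++ (PySem.Int.toStr (PySem.Int.mod (pyIndexD c) 2)).toList)
      = (fun bs c => bs ++ bits c) from funext fun bs => funext fun c => (List.append_assoc ..).trans rfl]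
  rw [PySem.List.foldl_append_eq_flatMap bits dna.toList []]
  rw [List.nil_append]
  have h8 : (8 : Int) = ((7 : Nat) : Int) + 1 := by norm_num
  have h4 : (4 : Int) = ((3 : Nat) : Int) + 1 := by norm_num
  rw [show (dna.toList.flatMap bits).length = ((dna.toList.flatMap bits).length : Nat) from rfl]
  simp only [h8, h4]
  rw [foldl_pyRange_slice_eq_chunks 7 (fun bl => Char.ofNat (parseBin bl)) (dna.toList.flatMap bits) [],
    foldl_pyRange_slice_eq_chunks 3 (fun g => Char.ofNat (groupValue g)) dna.toList []]
  rw [List.nil_append, List.nil_append, chunks_bits_eq]
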